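-- pv_equiv track=rewrite | github.com/mrinal22258/Neural-cryptanalysis-of-lightweight-symmetric-ciphers | Main.py | generate_key_schedule
-- ===== SOURCE A (Python) =====
-- from collections import deque
--
-- def generate_key_schedule(key, z_sequence, rounds, word_size):
--     mod_mask = (1 << word_size) - 1
--     m = 4  # Number of key words for m = 4
--     k_init = [((key >> (word_size * ((m - 1) - x))) & mod_mask) for x in range(m)]
--     k_reg = deque(k_init)
--     round_constant = mod_mask ^ 3  # 0xFFFF...FC
--
--     key_schedule = []
--     for x in range(rounds):
--         rs_3 = ((k_reg[0] << (word_size - 3)) + (k_reg[0] >> 3)) & mod_mask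
--         rs_3 ^= k_reg[2]
--         rs_1 = ((rs_3 << (word_size - 1)) + (rs_3 >> 1)) & mod_mask
--         c_z = ((z_sequence >> (x % 62)) & 1) ^ round_constant
--         new_k = c_z ^ rs_1 ^ rs_3 ^ k_reg[m - 1]
--         key_schedule.append(k_reg.pop())
--         k_reg.appendleft(new_k)
--
--     return key_schedule
-- ===== SOURCE B (Python) =====
-- from functools import lru_cache
--
-- def generate_key_schedule(key, z_sequence, rounds, word_size):
--     mod_mask = (1 << word_size) - 1
--     round_constant = mod_mask ^ 3
--
--     @lru_cache(maxsize=None)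
--     def word(i):
--         if i < 4:
--             return (key >> (word_size * i)) & mod_mask
--         a = word(i - 1)
--         rs_3 = (((a << (word_size - 3)) + (a >> 3)) & mod_mask) ^ word(i - 3)
--         rs_1 = ((rs_3 << (word_size - 1)) + (rs_3 >> 1)) & mod_mask
--         c_z = ((z_sequence >> ((i - 4) % 62)) & 1) ^ round_constant
--         return c_z ^ rs_1 ^ rs_3 ^ word(i - 4)
--
--     return [word(i) for i in range(rounds)]
-- ===== Notes on version B (the rewrite author's own statement) =====
-- stated objective: alternative
-- what changed: Replaces A's imperative 4-word deque rolling window (index into the window, pop right, append left each round) with a memoized recursive definition of the i-th schedule word (base case = key word i, recursive case = the SIMON recurrence on words i-1, i-3, i-4 with z-bit (i-4)%62), and produces the output as [word(i) for i in range(rounds)].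
import Mathlib
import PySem

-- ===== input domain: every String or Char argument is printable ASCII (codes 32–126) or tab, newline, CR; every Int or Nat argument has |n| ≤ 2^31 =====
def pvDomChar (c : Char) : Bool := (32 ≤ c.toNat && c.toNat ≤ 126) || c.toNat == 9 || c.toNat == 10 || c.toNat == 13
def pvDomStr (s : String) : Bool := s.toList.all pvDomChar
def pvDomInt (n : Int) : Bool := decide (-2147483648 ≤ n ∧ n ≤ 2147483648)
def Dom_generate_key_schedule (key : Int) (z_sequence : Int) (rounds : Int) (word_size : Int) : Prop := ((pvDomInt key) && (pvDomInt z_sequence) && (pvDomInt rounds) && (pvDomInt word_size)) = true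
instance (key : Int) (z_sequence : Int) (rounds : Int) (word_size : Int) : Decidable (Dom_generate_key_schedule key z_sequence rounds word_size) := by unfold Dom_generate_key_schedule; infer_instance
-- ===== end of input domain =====

-- B replaces A's imperative 4-word deque rolling window with a memoized recursive definition
-- of the i-th schedule word, mapped over range(rounds) (alternative decomposition; no speed claim).

-- ===== PORT A =====
-- the body of A's 'for x in range(rounds)' loop over the state (k_reg deque, key_schedule)
def pvStepA (z_sequence word_size mod_mask round_constant : Int)
    (st : List Int × List Int) (x : Int) : List Int × List Int :=
  let k_reg := st.1
  let rs_3 : Int := PySem.Int.band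
    ((PySem.List.pyGetD k_reg 0 0 <<< (word_size - 3).toNat)
      + (PySem.List.pyGetD k_reg 0 0 >>> (3 : Nat))) mod_mask
  let rs_3 := PySem.Int.bxor rs_3 (PySem.List.pyGetD k_reg 2 0)
  let rs_1 : Int := PySem.Int.band
    ((rs_3 <<< (word_size - 1).toNat) + (rs_3 >>> (1 : Nat))) mod_mask
  let c_z : Int := PySem.Int.bxor
    (PySem.Int.band (z_sequence >>> (PySem.Int.mod x 62).toNat) 1) round_constant
  let new_k := PySem.Int.bxor (PySem.Int.bxor (PySem.Int.bxor c_z rs_1) rs_3)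
    (PySem.List.pyGetD k_reg (4 - 1) 0)
  -- key_schedule.append(k_reg.pop()); k_reg.appendleft(new_k)
  (new_k :: k_reg.dropLast, st.2 ++ [PySem.List.pyGetD k_reg (-1) 0])

def generate_key_schedule (key : Int) (z_sequence : Int) (rounds : Int) (word_size : Int) : List Int :=
  let mod_mask : Int := (1 <<< word_size.toNat) - 1
  let k_init : List Int := (PySem.List.pyRange 0 4 1).map
    (fun x => PySem.Int.band (key >>> (word_size * ((4 - 1) - x)).toNat) mod_mask)
  let round_constant : Int := PySem.Int.bxor mod_mask 3
  ((PySem.List.pyRange 0 rounds 1).foldl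
      (pvStepA z_sequence word_size mod_mask round_constant) (k_init, [])).2

-- ===== PORT B =====
-- Source B's memoized recursion 'word(i)' evaluated by '[word(i) for i in range(rounds)]':
-- since the comprehension calls word in increasing order, the lru_cache holds exactly
-- word(0..i-1) when word(i) is computed; the port carries that cache explicitly
-- (pvWordCall = one call of word(i) against the warmed cache, exact for every i in order).
def pvWordCall (key z_sequence word_size mod_mask round_constant : Int)
    (cache : List Int) (i : Nat) : List Int :=
  if i < 4 then
    cache ++ [PySem.Int.band (key >>> (word_size * (i : Int)).toNat) mod_mask]
  else
    let a := cache.getD (i - 1) 0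
    let rs_3 := PySem.Int.bxor
      (PySem.Int.band ((a <<< (word_size - 3).toNat) + (a >>> (3 : Nat))) mod_mask)
      (cache.getD (i - 3) 0)
    let rs_1 := PySem.Int.band ((rs_3 <<< (word_size - 1).toNat) + (rs_3 >>> (1 : Nat))) mod_mask
    let c_z := PySem.Int.bxor
      (PySem.Int.band (z_sequence >>> (PySem.Int.mod ((i : Int) - 4) 62).toNat) 1) round_constant
    cache ++ [PySem.Int.bxor (PySem.Int.bxor (PySem.Int.bxor c_z rs_1) rs_3)
      (cache.getD (i - 4) 0)]

def generate_key_schedule_alt (key : Int) (z_sequence : Int) (rounds : Int) (word_size : Int) : List Int :=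
  let mod_mask : Int := (1 <<< word_size.toNat) - 1
  let round_constant : Int := PySem.Int.bxor mod_mask 3
  (PySem.List.pyRange 0 rounds 1).foldl
    (fun cache i => pvWordCall key z_sequence word_size mod_mask round_constant cache i.toNat) []

-- ===== PRECONDITION & SPEC =====
-- Python raises ValueError (negative shift count) when word_size < 0, and A also whenever its
-- loop runs (rounds > 0) with word_size < 3; Pre_ excludes exactly the inputs where A raises.
def Pre_generate_key_schedule (key : Int) (z_sequence : Int) (rounds : Int) (word_size : Int) : Prop :=
  0 ≤ word_size ∧ (rounds ≤ 0 ∨ 3 ≤ word_size)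
instance (key : Int) (z_sequence : Int) (rounds : Int) (word_size : Int) : Decidable (Pre_generate_key_schedule key z_sequence rounds word_size) := by unfold Pre_generate_key_schedule; infer_instance
def pvWitness_generate_key_schedule : Int × Int × Int × Int := (37, 5, 8, 4)

def Spec_generate_key_schedule (key : Int) (z_sequence : Int) (rounds : Int) (word_size : Int) (out : List Int) : Prop := out = generate_key_schedule_alt key z_sequence rounds word_size
instance (key : Int) (z_sequence : Int) (rounds : Int) (word_size : Int) (out : List Int) : Decidable (Spec_generate_key_schedule key z_sequence rounds word_size out) := by unfold Spec_generate_key_schedule; infer_instance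

-- ===== CLAIM (what is proved, stated in full; the proofs are below) =====
def Claim_equal_generate_key_schedule : Prop := ∀ (key : Int) (z_sequence : Int) (rounds : Int) (word_size : Int), Dom_generate_key_schedule key z_sequence rounds word_size → Pre_generate_key_schedule key z_sequence rounds word_size → Spec_generate_key_schedule key z_sequence rounds word_size (generate_key_schedule key z_sequence rounds word_size)


-- ===== LEMMAS AND PROOFS =====

-- the j-th key word (least-significant first)
def pvW (key word_size : Int) (j : Nat) : Int :=
  PySem.Int.band (key >>> (word_size * (j : Int)).toNat) ((1 <<< word_size.toNat) - 1)

-- the full schedule sequence: words 0..3, then the SIMON recurrence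
def pvF (key z_sequence word_size : Int) : Nat → Int
  | 0 => pvW key word_size 0
  | 1 => pvW key word_size 1
  | 2 => pvW key word_size 2
  | 3 => pvW key word_size 3
  | (t + 4) =>
    let mod_mask : Int := (1 <<< word_size.toNat) - 1
    let a := pvF key z_sequence word_size (t + 3)
    let rs_3 := PySem.Int.bxor
      (PySem.Int.band ((a <<< (word_size - 3).toNat) + (a >>> (3 : Nat))) mod_mask)
      (pvF key z_sequence word_size (t + 1))
    let rs_1 := PySem.Int.band ((rs_3 <<< (word_size - 1).toNat) + (rs_3 >>> (1 : Nat))) mod_mask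
    let c_z := PySem.Int.bxor (PySem.Int.band (z_sequence >>> (PySem.Int.mod (t : Int) 62).toNat) 1)
      (PySem.Int.bxor ((1 <<< word_size.toNat) - 1) 3)
    PySem.Int.bxor (PySem.Int.bxor (PySem.Int.bxor c_z rs_1) rs_3) (pvF key z_sequence word_size t)

theorem pvStepA_apply (key z_sequence word_size : Int) (n : Nat) (s : List Int) :
    pvStepA z_sequence word_size ((1 <<< word_size.toNat) - 1)
      (PySem.Int.bxor ((1 <<< word_size.toNat) - 1) 3)
      ([pvF key z_sequence word_size (n + 3), pvF key z_sequence word_size (n + 2),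
        pvF key z_sequence word_size (n + 1), pvF key z_sequence word_size n], s) (n : Int)
    = ([pvF key z_sequence word_size (n + 4), pvF key z_sequence word_size (n + 3),
        pvF key z_sequence word_size (n + 2), pvF key z_sequence word_size (n + 1)],
       s ++ [pvF key z_sequence word_size n]) := by
  show _ = (pvF key z_sequence word_size (n + 4) :: _, _)
  simp [pvStepA, pvF, PySem.List.pyGetD, PySem.List.pyGet?, PySem.List.pyIdx?]

theorem pvLoopA (key z_sequence word_size : Int) (n : Nat) :
    (PySem.List.pyRange 0 (n : Int) 1).foldl
      (pvStepA z_sequence word_size ((1 <<< word_size.toNat) - 1)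
        (PySem.Int.bxor ((1 <<< word_size.toNat) - 1) 3))
      ([pvF key z_sequence word_size 3, pvF key z_sequence word_size 2,
        pvF key z_sequence word_size 1, pvF key z_sequence word_size 0], [])
    = ([pvF key z_sequence word_size (n + 3), pvF key z_sequence word_size (n + 2),
        pvF key z_sequence word_size (n + 1), pvF key z_sequence word_size n],
       (List.range n).map (pvF key z_sequence word_size)) := by
  induction n with
  | zero => simp [PySem.List.pyRange_one_eq_nil]
  | succ n ih =>
    have hc : ((n + 1 : Nat) : Int) = (n : Int) + 1 := by push_cast; ring
    rw [hc, PySem.List.pyRange_one_succ_right (by positivity), List.foldl_append, ih]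
    simp only [List.foldl_cons, List.foldl_nil]
    rw [pvStepA_apply key]
    simp [List.range_succ]

theorem pvA_eq (key z_sequence rounds word_size : Int) :
    generate_key_schedule key z_sequence rounds word_size
      = (List.range rounds.toNat).map (pvF key z_sequence word_size) := by
  have hinit : (PySem.List.pyRange 0 4 1).map
      (fun x => PySem.Int.band (key >>> (word_size * ((4 - 1) - x)).toNat) ((1 <<< word_size.toNat) - 1))
      = [pvF key z_sequence word_size 3, pvF key z_sequence word_size 2,
         pvF key z_sequence word_size 1, pvF key z_sequence word_size 0] := by
    have h4 : PySem.List.pyRange 0 4 1 = [0, 1, 2, 3] := by decide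
    rw [h4]
    simp [pvF, pvW]
  rcases Int.lt_or_le rounds 0 with h | h
  · unfold generate_key_schedule
    rw [show PySem.List.pyRange 0 rounds 1 = [] from PySem.List.pyRange_one_eq_nil (by omega)]
    simp [Int.toNat_of_nonpos h.le]
  · obtain ⟨n, rfl⟩ : ∃ n : Nat, rounds = (n : Int) := ⟨rounds.toNat, by omega⟩
    unfold generate_key_schedule
    simp only [hinit, Int.toNat_natCast]
    rw [pvLoopA]

-- one memoized call of word(n) against the cache word(0..n-1) produces word(0..n)
theorem pvWordCall_apply (key z_sequence word_size : Int) (n : Nat) :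
    pvWordCall key z_sequence word_size ((1 <<< word_size.toNat) - 1)
      (PySem.Int.bxor ((1 <<< word_size.toNat) - 1) 3)
      ((List.range n).map (pvF key z_sequence word_size)) n
    = (List.range (n + 1)).map (pvF key z_sequence word_size) := by
  have hget : ∀ j : Nat, j < n →
      ((List.range n).map (pvF key z_sequence word_size)).getD j 0
        = pvF key z_sequence word_size j := by
    intro j hj
    simp [List.getD, hj]
  by_cases h : n < 4
  · rw [pvWordCall, if_pos h, List.range_succ, List.map_append]
    interval_cases n <;> rfl
  · obtain ⟨t, rfl⟩ : ∃ t : Nat, n = t + 4 := ⟨n - 4, by omega⟩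
    rw [pvWordCall, if_neg h]
    simp only [Nat.add_sub_cancel,
      show t + 4 - 1 = t + 3 from by omega, show t + 4 - 3 = t + 1 from by omega]
    rw [hget (t + 3) (by omega), hget (t + 1) (by omega), hget t (by omega)]
    have hz : (((t + 4 : Nat) : Int) - 4) = (t : Int) := by push_cast; ring
    rw [hz]
    conv_rhs => rw [List.range_succ, List.map_append]
    congr 1

theorem pvLoopB (key z_sequence word_size : Int) (n : Nat) :
    (PySem.List.pyRange 0 (n : Int) 1).foldl
      (fun cache i => pvWordCall key z_sequence word_size ((1 <<< word_size.toNat) - 1)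
        (PySem.Int.bxor ((1 <<< word_size.toNat) - 1) 3) cache i.toNat) []
    = (List.range n).map (pvF key z_sequence word_size) := by
  induction n with
  | zero => simp [PySem.List.pyRange_one_eq_nil]
  | succ n ih =>
    have hc : ((n + 1 : Nat) : Int) = (n : Int) + 1 := by push_cast; ring
    rw [hc, PySem.List.pyRange_one_succ_right (by positivity), List.foldl_append, ih]
    simp only [List.foldl_cons, List.foldl_nil, Int.toNat_natCast]
    exact pvWordCall_apply key z_sequence word_size n

theorem pvB_eq (key z_sequence rounds word_size : Int) :
    generate_key_schedule_alt key z_sequence rounds word_size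
      = (List.range rounds.toNat).map (pvF key z_sequence word_size) := by
  unfold generate_key_schedule_alt
  rcases Int.lt_or_le rounds 0 with h | h
  · rw [show PySem.List.pyRange 0 rounds 1 = [] from PySem.List.pyRange_one_eq_nil (by omega)]
    simp [Int.toNat_of_nonpos h.le]
  · obtain ⟨n, rfl⟩ : ∃ n : Nat, rounds = (n : Int) := ⟨rounds.toNat, by omega⟩
    rw [pvLoopB]
    simp

-- ===== VERDICT (by name: the statement is the Claim_ definition above) =====
theorem generate_key_schedule_spec : Claim_equal_generate_key_schedule := by
  intro key z_sequence rounds word_size _ _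
  unfold Spec_generate_key_schedule
  rw [pvA_eq, pvB_eq]
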